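-- pv_equiv track=rewrite | github.com/big-unibo/llm4dfm-develop | llm4dfm/pipeline/preprocess.py | _process
-- ===== SOURCE A (Python) =====
-- def erase(string, chars_to_remove):
--     string_to_ret = string
--     for char in chars_to_remove:
--         string_to_ret = string_to_ret.replace(char, "")
--     return string_to_ret
--
-- def _process(deps, ignore, substitutions):
--     dep = []
--     for d in deps:
--         d = erase(d, [' ', '-', '_'])
--         if d.lower() in ignore:
--             dep = []
--             break
--         dep_to_add = d
--         for word, sub_words in substitutions.items():
--             if d != word and d.lower() in sub_words:
--                 dep_to_add = word
--                 break
--         dep.append(erase(dep_to_add, [' ', '-', '_']))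
--     return ','.join(dep)
-- ===== SOURCE B (Python) =====
-- def erase(string, chars_to_remove):
--     string_to_ret = string
--     for char in chars_to_remove:
--         string_to_ret = string_to_ret.replace(char, "")
--     return string_to_ret
--
-- def _process(deps, ignore, substitutions):
--     # Inverted index, built once: lowercase sub-word -> candidate words in substitutions order.
--     index = {}
--     for word, sub_words in substitutions.items():
--         for sw in sub_words:
--             index[sw] = index.get(sw, []) + [word]
--     out = []
--     for d in deps:
--         n = erase(d, [' ', '-', '_'])
--         low = n.lower()
--         if low in ignore:
--             return ''
--         chosen = next((w for w in index.get(low, []) if w != n), n)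
--         out.append(erase(chosen, [' ', '-', '_']))
--     return ','.join(out)
-- ===== Notes on version B (the rewrite author's own statement) =====
-- stated objective: alternative
-- what changed: B precomputes an inverted index (lowercased sub-word -> candidate words in substitutions order) once, so the per-dependency inner scan over substitutions.items() disappears; the main loop normalizes, aborts to '' on an ignored name, and picks the first indexed candidate differing from the name.
import Mathlib
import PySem

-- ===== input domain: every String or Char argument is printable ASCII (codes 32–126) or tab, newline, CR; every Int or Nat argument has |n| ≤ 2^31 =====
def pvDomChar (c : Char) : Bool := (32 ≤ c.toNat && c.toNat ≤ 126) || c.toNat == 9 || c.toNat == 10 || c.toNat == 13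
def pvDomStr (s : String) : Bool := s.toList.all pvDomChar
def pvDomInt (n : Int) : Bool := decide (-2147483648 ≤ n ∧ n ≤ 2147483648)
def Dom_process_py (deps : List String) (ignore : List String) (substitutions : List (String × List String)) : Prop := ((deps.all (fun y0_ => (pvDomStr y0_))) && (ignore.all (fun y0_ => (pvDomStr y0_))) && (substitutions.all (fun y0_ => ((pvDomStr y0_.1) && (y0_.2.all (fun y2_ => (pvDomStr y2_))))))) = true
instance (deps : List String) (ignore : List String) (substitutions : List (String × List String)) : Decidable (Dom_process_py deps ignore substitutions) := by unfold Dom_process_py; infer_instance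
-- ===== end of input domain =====

-- B replaces A's per-dependency scan of substitutions.items() by an inverted index built once
-- (lowercased sub-word -> candidate words in substitutions order); objective: alternative
-- data structure, same return value everywhere.

-- ===== PORT A =====
-- erase(string, chars_to_remove): shared helper of both Pythons
def pvErase (s : String) (cs : List String) : String :=
  cs.foldl (fun acc c => PySem.Str.replace acc c "") s

-- A's inner 'for word, sub_words in substitutions.items(): … break' (first match wins)
def pvSub (d : String) : List (String × List String) → String
  | [] => d
  | (word, subWords) :: rest =>
      if d ≠ word ∧ subWords.contains (PySem.Str.lower d) then word
      else pvSub d rest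

-- A's main 'for d in deps' loop with accumulator `dep`; the ignored branch sets dep = [] and breaks
def processALoop (ignore : List String) (subs : List (String × List String)) :
    List String → List String → List String
  | [], dep => dep
  | d :: rest, dep =>
      let d' := pvErase d [" ", "-", "_"]
      if ignore.contains (PySem.Str.lower d') then []
      else processALoop ignore subs rest (dep ++ [pvErase (pvSub d' subs) [" ", "-", "_"]])

def process_py (deps : List String) (ignore : List String) (substitutions : List (String × List String)) : String :=
  PySem.Str.join "," (processALoop ignore substitutions deps [])

-- ===== PORT B =====
-- Source B's index build: for word, sub_words: for sw in sub_words: index[sw] = index.get(sw, []) + [word]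
def pvBuildIndex (subs : List (String × List String)) : PySem.Dict String (List String) :=
  subs.foldl (fun idx p =>
    p.2.foldl (fun idx sw => idx.modify sw [] (fun ws => ws ++ [p.1])) idx) PySem.Dict.empty

-- Source B's 'chosen = next((w for w in index.get(low, []) if w != n), n)'
def pvChoose (idx : PySem.Dict String (List String)) (n : String) : String :=
  ((idx.getD (PySem.Str.lower n) []).find? (fun w => w != n)).getD n

-- Source B's main loop: early 'return ""' on an ignored name, else append the chosen word
def processBLoop (ignore : List String) (idx : PySem.Dict String (List String)) :
    List String → List String → String
  | [], out => PySem.Str.join "," out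
  | d :: rest, out =>
      let n := pvErase d [" ", "-", "_"]
      if ignore.contains (PySem.Str.lower n) then ""
      else processBLoop ignore idx rest (out ++ [pvErase (pvChoose idx n) [" ", "-", "_"]])

def process_py_alt (deps : List String) (ignore : List String) (substitutions : List (String × List String)) : String :=
  processBLoop ignore (pvBuildIndex substitutions) deps []

-- ===== PRECONDITION & SPEC =====
def Spec_process_py (deps : List String) (ignore : List String) (substitutions : List (String × List String)) (out : String) : Prop := out = process_py_alt deps ignore substitutions
instance (deps : List String) (ignore : List String) (substitutions : List (String × List String)) (out : String) : Decidable (Spec_process_py deps ignore substitutions out) := by unfold Spec_process_py; infer_instance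

-- ===== CLAIM (what is proved, stated in full; the proofs are below) =====
def Claim_equal_process_py : Prop := ∀ (deps : List String) (ignore : List String) (substitutions : List (String × List String)), Dom_process_py deps ignore substitutions → Spec_process_py deps ignore substitutions (process_py deps ignore substitutions)


-- ===== LEMMAS AND PROOFS =====
-- a nested foldl over the inner lists is the foldl over the flattened pair list
theorem pvFoldlFlatMap {a b c : Type} (f : c -> b -> c) (g : a -> List b) :
    forall (l : List a) (init : c), (l.flatMap g).foldl f init = l.foldl (fun acc p => (g p).foldl f acc) init := by
  intro l
  induction l with
  | nil => intro init; simp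
  | cons p rest ih => intro init; simp [List.foldl_append, ih]

-- find? over a constant-mapped list
theorem pvFindConstMap (x n : String) (l : List String) :
    ((l.map (fun _ => x)).find? (fun w => w != n)) = if l ≠ [] ∧ x ≠ n then some x else none := by
  cases l with
  | nil => simp
  | cons a t =>
      by_cases h : x = n
      · subst h; simp
      · simp [h, bne_iff_ne]

-- the index, characterised: getD c [] = words of pairs whose sub_words contain c, in order (with multiplicity)
theorem pvBuildIndex_getD (subs : List (String × List String)) (c : String) :
    (pvBuildIndex subs).getD c [] =
      ((subs.flatMap (fun p => p.2.map (fun sw => (sw, p.1)))).filter (fun q => q.1 == c)).map (·.2) := by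
  unfold pvBuildIndex
  rw [show (fun (idx : PySem.Dict String (List String)) (p : String × List String) =>
        p.2.foldl (fun idx sw => idx.modify sw [] (fun ws => ws ++ [p.1])) idx)
      = (fun idx p => (p.2.map (fun sw => (sw, p.1))).foldl
            (fun (d : PySem.Dict String (List String)) q => d.modify q.1 [] (fun ws => ws ++ [q.2])) idx) by
    funext idx p; rw [List.foldl_map]]
  rw [← pvFoldlFlatMap]
  rw [PySem.Dict.getD_foldl_modify_append]
  simp [PySem.Dict.getD_empty]

-- selecting the first candidate ≠ n from the index = A's first-matching-pair scan
theorem pvChoose_buildIndex (subs : List (String × List String)) (n : String) :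
    pvChoose (pvBuildIndex subs) n = pvSub n subs := by
  unfold pvChoose
  rw [pvBuildIndex_getD]
  induction subs with
  | nil => simp [pvSub]
  | cons p rest ih =>
      obtain ⟨word, sws⟩ := p
      simp only [List.flatMap_cons, List.filter_append, List.map_append, List.find?_append]
      rw [show ((sws.map (fun sw => (sw, word))).filter (fun q => q.1 == PySem.Str.lower n)).map (·.2)
          = (sws.filter (fun sw => sw == PySem.Str.lower n)).map (fun _ => word) by
        rw [List.filter_map, List.map_map]; rfl]
      rw [pvFindConstMap]
      show _ = pvSub n ((word, sws) :: rest)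
      unfold pvSub
      by_cases hm : sws.contains (PySem.Str.lower n) = true ∧ n ≠ word
      · have hmem : PySem.Str.lower n ∈ sws := by
          simpa using hm.1
        have hf : sws.filter (fun sw => sw == PySem.Str.lower n) ≠ [] := by
          have : PySem.Str.lower n ∈ sws.filter (fun sw => sw == PySem.Str.lower n) :=
            List.mem_filter.mpr ⟨hmem, by simp⟩
          exact List.ne_nil_of_mem this
        rw [if_pos ⟨hf, Ne.symm hm.2⟩, if_pos ⟨hm.2, hm.1⟩]
        simp
      · have hneg : ¬ (sws.filter (fun sw => sw == PySem.Str.lower n) ≠ [] ∧ word ≠ n) := by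
          intro ⟨hf, hw⟩
          apply hm
          constructor
          · rcases List.exists_mem_of_ne_nil _ hf with ⟨a, ha⟩
            rcases List.mem_filter.mp ha with ⟨hal, hae⟩
            have : a = PySem.Str.lower n := by simpa using hae
            subst this
            simpa using hal
          · exact Ne.symm hw
        rw [if_neg hneg, if_neg (by intro ⟨h1, h2⟩; exact hneg ⟨by
              have : PySem.Str.lower n ∈ sws := by simpa using h2
              exact List.ne_nil_of_mem (List.mem_filter.mpr ⟨this, by simp⟩), Ne.symm h1⟩)]
        simpa using ih

-- A's loop, characterised
theorem processALoop_eq (ignore : List String) (subs : List (String × List String)) :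
    ∀ (deps acc : List String),
      processALoop ignore subs deps acc =
        if deps.any (fun d => ignore.contains (PySem.Str.lower (pvErase d [" ", "-", "_"]))) then []
        else acc ++ deps.map (fun d => pvErase (pvSub (pvErase d [" ", "-", "_"]) subs) [" ", "-", "_"]) := by
  intro deps
  induction deps with
  | nil => intro acc; simp [processALoop]
  | cons d rest ih =>
      intro acc
      by_cases h : ignore.contains (PySem.Str.lower (pvErase d [" ", "-", "_"])) = true
      · simp at h
        simp [processALoop, h]
      · simp only [Bool.not_eq_true] at h
        simp only [processALoop, h, ih, List.any_cons, Bool.false_or, List.map_cons]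
        rw [if_neg (by simp)]
        split_ifs with h2 <;> simp

-- B's loop, characterised
theorem processBLoop_eq (ignore : List String) (idx : PySem.Dict String (List String)) :
    ∀ (deps acc : List String),
      processBLoop ignore idx deps acc =
        if deps.any (fun d => ignore.contains (PySem.Str.lower (pvErase d [" ", "-", "_"]))) then ""
        else PySem.Str.join ","
          (acc ++ deps.map (fun d => pvErase (pvChoose idx (pvErase d [" ", "-", "_"])) [" ", "-", "_"])) := by
  intro deps
  induction deps with
  | nil => intro acc; simp [processBLoop]
  | cons d rest ih =>
      intro acc
      by_cases h : ignore.contains (PySem.Str.lower (pvErase d [" ", "-", "_"])) = true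
      · simp at h
        simp [processBLoop, h]
      · simp only [Bool.not_eq_true] at h
        simp only [processBLoop, h, ih, List.any_cons, Bool.false_or, List.map_cons]
        rw [if_neg (by simp)]
        split_ifs with h2 <;> simp

-- ===== VERDICT (by name: the statement is the Claim_ definition above) =====
theorem process_py_spec : Claim_equal_process_py := by
  intro deps ignore subs _
  unfold Spec_process_py process_py process_py_alt
  rw [processALoop_eq, processBLoop_eq]
  split_ifs with h
  · decide
  · simp only [List.nil_append]
    rw [show deps.map (fun d => pvErase (pvChoose (pvBuildIndex subs) (pvErase d [" ", "-", "_"])) [" ", "-", "_"])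
        = deps.map (fun d => pvErase (pvSub (pvErase d [" ", "-", "_"]) subs) [" ", "-", "_"]) from
      List.map_congr_left (fun d _ => by rw [pvChoose_buildIndex])]
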